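-- pv_equiv track=rewrite | github.com/Vale-source/Programacion-1 | Funciones.py | option_6
-- ===== SOURCE A (Python) =====
-- def option_6(passenger_list,country_to_find,country_list):
--     counter_country = 0
--     for city in passenger_list:
--         for findcountry in country_list:
--             if country_to_find == findcountry[1]:
--                 if findcountry[0] == city[2]:
--                     counter_country += 1
--                     continue
--     return f"La cantidad de personas que viajan a {country_to_find} son {counter_country}"
-- ===== SOURCE B (Python) =====
-- def option_6(passenger_list, country_to_find, country_list):
--     # codes of cities that belong to the wanted country (duplicates kept: each entry counts)
--     codes = [entry[0] for entry in country_list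
--              if len(entry) > 1 and entry[1] == country_to_find]
--     total = 0
--     if codes:
--         counts = {}
--         for p in passenger_list:
--             counts[p[2]] = counts.get(p[2], 0) + 1
--         total = sum(counts.get(c, 0) for c in codes)
--     return f"La cantidad de personas que viajan a {country_to_find} son {total}"
-- ===== Notes on version B (the rewrite author's own statement) =====
-- stated objective: alternative
-- what changed: A rescans country_list once per passenger with nested loops; B extracts the matching city codes once, builds a dict counting passenger city codes in one pass, and sums the looked-up counts over those codes.
import Mathlib
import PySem

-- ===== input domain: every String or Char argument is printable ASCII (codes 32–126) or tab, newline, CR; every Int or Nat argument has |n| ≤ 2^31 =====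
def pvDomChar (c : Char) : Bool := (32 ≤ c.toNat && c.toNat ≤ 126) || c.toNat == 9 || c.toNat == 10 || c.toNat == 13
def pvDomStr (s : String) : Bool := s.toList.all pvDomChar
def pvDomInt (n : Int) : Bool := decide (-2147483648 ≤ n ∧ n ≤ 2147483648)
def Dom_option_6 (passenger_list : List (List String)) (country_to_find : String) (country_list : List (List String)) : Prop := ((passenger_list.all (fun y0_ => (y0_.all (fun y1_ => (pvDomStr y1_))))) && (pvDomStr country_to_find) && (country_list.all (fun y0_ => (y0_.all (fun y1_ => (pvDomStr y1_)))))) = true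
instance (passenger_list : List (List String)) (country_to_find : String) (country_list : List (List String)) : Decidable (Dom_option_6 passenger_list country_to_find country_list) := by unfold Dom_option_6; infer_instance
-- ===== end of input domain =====

-- B replaces A's nested rescans by one counting dict over passenger city codes plus one pass
-- over country_list.

-- shared index accessors of both ports (Python's fc[1], fc[0], city[2]); the "" default of
-- pyGetD is never the value used on inputs admitted by Pre_option_6
def pvG1 (e : List String) : String := PySem.List.pyGetD e 1 ""
def pvG0 (e : List String) : String := PySem.List.pyGetD e 0 ""
def pvKey (p : List String) : String := PySem.List.pyGetD p 2 ""

-- ===== PORT A =====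
def option_6 (passenger_list : List (List String)) (country_to_find : String) (country_list : List (List String)) : String :=
  let counter_country : Int :=
    passenger_list.foldl (fun acc city =>
      country_list.foldl (fun a2 findcountry =>
        if country_to_find == pvG1 findcountry then
          if pvG0 findcountry == pvKey city then a2 + 1
          else a2
        else a2) acc) 0
  "La cantidad de personas que viajan a " ++ country_to_find ++ " son " ++ PySem.Int.toStr counter_country

-- ===== PORT B =====
def option_6_alt (passenger_list : List (List String)) (country_to_find : String) (country_list : List (List String)) : String :=
  let codes : List String :=
    (country_list.filter (fun e => decide (1 < e.length) && (pvG1 e == country_to_find))).map pvG0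
  let total : Int :=
    if codes.isEmpty then 0
    else
      let counts : PySem.Dict String Int :=
        passenger_list.foldl (fun d p => d.insert (pvKey p) (d.getD (pvKey p) 0 + 1)) PySem.Dict.empty
      codes.foldl (fun s c => s + counts.getD c 0) 0
  "La cantidad de personas que viajan a " ++ country_to_find ++ " son " ++ PySem.Int.toStr total

-- ===== PRECONDITION & SPEC =====
-- Pre_ is exactly the inputs on which the Python A returns (no IndexError): either no
-- passengers, or every country row has the two indexed fields and, when some country row
-- names the wanted country, every passenger row has its city-code field.
def Pre_option_6 (passenger_list : List (List String)) (country_to_find : String) (country_list : List (List String)) : Prop :=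
  passenger_list = [] ∨
    ((∀ c ∈ country_list, 2 ≤ c.length) ∧
      ((∃ c ∈ country_list, c.getD 1 "" = country_to_find) → ∀ p ∈ passenger_list, 3 ≤ p.length))
instance (passenger_list : List (List String)) (country_to_find : String) (country_list : List (List String)) : Decidable (Pre_option_6 passenger_list country_to_find country_list) := by unfold Pre_option_6; infer_instance

def pvWitness_option_6 : List (List String) × String × List (List String) :=
  ([["Ana", "x", "MAD"]], "Spain", [["MAD", "Spain"]])

def Spec_option_6 (passenger_list : List (List String)) (country_to_find : String) (country_list : List (List String)) (out : String) : Prop := out = option_6_alt passenger_list country_to_find country_list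
instance (passenger_list : List (List String)) (country_to_find : String) (country_list : List (List String)) (out : String) : Decidable (Spec_option_6 passenger_list country_to_find country_list out) := by unfold Spec_option_6; infer_instance

-- ===== CLAIM (what is proved, stated in full; the proofs are below) =====
def Claim_equal_option_6 : Prop := ∀ (passenger_list : List (List String)) (country_to_find : String) (country_list : List (List String)), Dom_option_6 passenger_list country_to_find country_list → Pre_option_6 passenger_list country_to_find country_list → Spec_option_6 passenger_list country_to_find country_list (option_6 passenger_list country_to_find country_list)

-- ===== LEMMAS AND PROOFS =====

-- the per-pair indicator of A's nested loops
def pvInd (ctf : String) (fc city : List String) : Int :=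
  if ctf == pvG1 fc then (if pvG0 fc == pvKey city then 1 else 0) else 0

-- a foldl that adds a function of the element = sum of the mapped list
theorem pv_foldl_sum {α : Type} (l : List α) (g : α → Int) (a : Int) :
    l.foldl (fun s x => s + g x) a = a + (l.map g).sum := by
  induction l generalizing a with
  | nil => simp
  | cons x xs ih => simp [ih]; ring

theorem pv_sum_map_add {α : Type} (l : List α) (f g : α → Int) :
    (l.map (fun x => f x + g x)).sum = (l.map f).sum + (l.map g).sum := by
  induction l with
  | nil => simp
  | cons x xs ih => simp [ih]; ring

-- exchange of a double sum over two lists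
theorem pv_sum_swap {α β : Type} (l1 : List α) (l2 : List β) (f : α → β → Int) :
    (l1.map (fun a => (l2.map (f a)).sum)).sum
      = (l2.map (fun b => (l1.map (fun a => f a b)).sum)).sum := by
  induction l1 with
  | nil => simp
  | cons x xs ih => simp only [List.map_cons, List.sum_cons, ih, pv_sum_map_add]

-- sum over a filtered list = sum of guarded terms over the whole list
theorem pv_sum_filter {α : Type} (l : List α) (p : α → Bool) (g : α → Int) :
    ((l.filter p).map g).sum = (l.map (fun x => if p x then g x else 0)).sum := by
  induction l with
  | nil => simp
  | cons x xs ih => by_cases h : p x = true <;> simp [h, ih]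

-- count among mapped keys as a sum of indicators
theorem pv_count_as_sum (l : List (List String)) (key : List String → String) (c : String) :
    (((l.map key).count c : Int)) = (l.map (fun x => if c == key x then (1 : Int) else 0)).sum := by
  induction l with
  | nil => simp
  | cons x xs ih =>
      by_cases h : c = key x
      · subst h
        simp only [List.map_cons, List.count_cons, List.sum_cons]
        push_cast
        rw [ih]
        simp [add_comm]
      · have h2 : (key x == c) = false := by simp; exact fun hh => h hh.symm
        have h3 : (c == key x) = false := by simp [h]
        simp only [List.map_cons, List.count_cons, List.sum_cons, h2, h3]
        push_cast
        rw [ih]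
        simp

-- B's counting fold, looked up at c, counts c among the passenger city codes
theorem pv_counts_getD_gen (pl : List (List String)) (d : PySem.Dict String Int) (c : String) :
    (pl.foldl (fun d p => d.insert (pvKey p) (d.getD (pvKey p) 0 + 1)) d).getD c 0
      = d.getD c 0 + ((pl.map pvKey).count c : Int) := by
  induction pl generalizing d with
  | nil => simp
  | cons p ps ih =>
      simp only [List.foldl_cons, ih, List.map_cons, List.count_cons]
      rw [PySem.Dict.getD_insert]
      by_cases h : c = pvKey p
      · simp [h]
        ring
      · have h2 : (pvKey p == c) = false := by simp; exact fun hh => h hh.symm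
        simp only [if_neg h, h2]
        push_cast
        ring

theorem pv_counts_getD (pl : List (List String)) (c : String) :
    (pl.foldl (fun d p => d.insert (pvKey p) (d.getD (pvKey p) 0 + 1)) PySem.Dict.empty).getD c 0
      = ((pl.map pvKey).count c : Int) := by
  rw [pv_counts_getD_gen]
  simp [PySem.Dict.getD_empty]

-- the core numeric equality of the two ports
theorem pv_hnum (pl : List (List String)) (ctf : String) (cl : List (List String))
    (hpre : Pre_option_6 pl ctf cl) :
    pl.foldl (fun acc city =>
      cl.foldl (fun a2 fc =>
        if ctf == pvG1 fc then (if pvG0 fc == pvKey city then a2 + 1 else a2) else a2) acc) 0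
    = (if (((cl.filter (fun e => decide (1 < e.length) && (pvG1 e == ctf))).map pvG0).isEmpty) then (0 : Int)
       else ((cl.filter (fun e => decide (1 < e.length) && (pvG1 e == ctf))).map pvG0).foldl
         (fun s c => s + (pl.foldl (fun d p => d.insert (pvKey p) (d.getD (pvKey p) 0 + 1)) PySem.Dict.empty).getD c 0) 0) := by
  -- the guard 'if codes.isEmpty then 0 else fold' always equals the fold (fold over [] is 0)
  have hif : ∀ (X : List String) (f : Int → String → Int),
      (if X.isEmpty then (0 : Int) else X.foldl f 0) = X.foldl f 0 := by
    intro X f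
    by_cases hX : X.isEmpty
    · have : X = [] := by simpa [List.isEmpty_iff] using hX
      subst this
      simp
    · rw [if_neg hX]
  rw [hif]
  -- A's nested folds as a double sum
  have hA : pl.foldl (fun acc city =>
      cl.foldl (fun a2 fc =>
        if ctf == pvG1 fc then (if pvG0 fc == pvKey city then a2 + 1 else a2) else a2) acc) 0
      = (pl.map (fun city => (cl.map (fun fc => pvInd ctf fc city)).sum)).sum := by
    have h1 : (fun (acc : Int) (city : List String) =>
        cl.foldl (fun a2 fc =>
          if ctf == pvG1 fc then (if pvG0 fc == pvKey city then a2 + 1 else a2) else a2) acc)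
        = (fun acc city => acc + (cl.map (fun fc => pvInd ctf fc city)).sum) := by
      funext acc city
      rw [show (fun (a2 : Int) (fc : List String) =>
          if ctf == pvG1 fc then (if pvG0 fc == pvKey city then a2 + 1 else a2) else a2)
          = (fun a2 fc => a2 + pvInd ctf fc city) from by
        funext a2 fc
        simp only [pvInd]
        split_ifs <;> ring]
      rw [pv_foldl_sum]
    rw [h1, pv_foldl_sum]
    simp
  rw [hA]
  -- B's fold as a sum over the filtered country rows
  rw [pv_foldl_sum]
  simp only [zero_add, List.map_map, Function.comp_def]
  rcases hpre with rfl | ⟨hlen, -⟩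
  · -- no passengers: every count is 0 and A's sum is empty
    simp
  · -- each looked-up count is a sum of indicators over the passengers
    have hpoint : ((cl.filter (fun e => decide (1 < e.length) && (pvG1 e == ctf))).map
        (fun fc => (pl.foldl (fun d p => d.insert (pvKey p) (d.getD (pvKey p) 0 + 1)) PySem.Dict.empty).getD (pvG0 fc) 0))
        = ((cl.filter (fun e => decide (1 < e.length) && (pvG1 e == ctf))).map
          (fun fc => (pl.map (fun city => if pvG0 fc == pvKey city then (1 : Int) else 0)).sum)) := by
      refine List.map_congr_left ?_
      intro fc _
      rw [pv_counts_getD, pv_count_as_sum]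
    rw [hpoint, pv_sum_filter, pv_sum_swap pl cl (fun city fc => pvInd ctf fc city)]
    refine congrArg List.sum (List.map_congr_left ?_)
    intro fc hfc
    have h2 : 2 ≤ fc.length := hlen fc hfc
    have hm : (decide (1 < fc.length) && (pvG1 fc == ctf)) = (pvG1 fc == ctf) := by
      have : (1 < fc.length) := by omega
      simp [this]
    rw [hm]
    by_cases he : pvG1 fc = ctf
    · have h1 : (pvG1 fc == ctf) = true := by simp [he]
      have h1' : (ctf == pvG1 fc) = true := by simp [he]
      simp only [pvInd, h1, h1', if_true]
    · have h1 : (pvG1 fc == ctf) = false := by simp [he]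
      have h1' : (ctf == pvG1 fc) = false := by simp; exact fun hh => he hh.symm
      simp [pvInd, h1, h1']

-- ===== VERDICT (by name: the statement is the Claim_ definition above) =====
theorem option_6_spec : Claim_equal_option_6 := by
  intro pl ctf cl _hdom hpre
  show option_6 pl ctf cl = option_6_alt pl ctf cl
  exact congrArg
    (fun z : Int => "La cantidad de personas que viajan a " ++ ctf ++ " son " ++ PySem.Int.toStr z)
    (pv_hnum pl ctf cl hpre)
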